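-- pv_equiv track=rewrite | github.com/stalyndc/tinyseoai-cli | tinyseoai/data/scoring.py | _categorize_issue
-- ===== SOURCE A (Python) =====
-- def _categorize_issue(issue_type: str) -> str:
--     """Categorize issue into broad categories."""
--     categories = {
--         "content": [
--             "title_missing",
--             "title_too_long",
--             "meta_description_missing",
--             "duplicate_title",
--             "duplicate_meta_description",
--             "thin_content",
--             "very_thin_content",
--             "duplicate_content",
--             "near_duplicate_content",
--             "potential_keyword_stuffing",
--         ],
--         "technical": [
--             "no_https",
--             "ssl_expired",
--             "missing_canonical",
--             "multiple_canonical_tags",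
--             "noindex_directive",
--             "conflicting_robots_directives",
--             "missing_viewport",
--         ],
--         "links": [
--             "broken_link",
--             "orphan_page",
--             "page_too_deep",
--             "empty_anchor_text",
--             "generic_anchor_text",
--         ],
--         "performance": [
--             "large_html_size",
--             "no_compression",
--             "render_blocking_css",
--             "render_blocking_javascript",
--             "images_without_dimensions",
--         ],
--         "social": [
--             "missing_og_tag",
--             "missing_twitter_card",
--             "missing_favicon",
--         ],
--         "security": [
--             "no_https",
--             "ssl_expired",
--             "missing_hsts",
--             "missing_csp",
--         ],
--     }
--
--     for category, issue_types in categories.items():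
--         if issue_type in issue_types:
--             return category
--
--     return "other"
-- ===== SOURCE B (Python) =====
-- # Flat (issue_type, category) table, sorted by issue_type; the two issue types that
-- # appear under two categories ("no_https", "ssl_expired") are listed with their first
-- # category in A's scan order ("technical").
-- _TABLE = [
--     ("broken_link", "links"),
--     ("conflicting_robots_directives", "technical"),
--     ("duplicate_content", "content"),
--     ("duplicate_meta_description", "content"),
--     ("duplicate_title", "content"),
--     ("empty_anchor_text", "links"),
--     ("generic_anchor_text", "links"),
--     ("images_without_dimensions", "performance"),
--     ("large_html_size", "performance"),
--     ("meta_description_missing", "content"),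
--     ("missing_canonical", "technical"),
--     ("missing_csp", "security"),
--     ("missing_favicon", "social"),
--     ("missing_hsts", "security"),
--     ("missing_og_tag", "social"),
--     ("missing_twitter_card", "social"),
--     ("missing_viewport", "technical"),
--     ("multiple_canonical_tags", "technical"),
--     ("near_duplicate_content", "content"),
--     ("no_compression", "performance"),
--     ("no_https", "technical"),
--     ("noindex_directive", "technical"),
--     ("orphan_page", "links"),
--     ("page_too_deep", "links"),
--     ("potential_keyword_stuffing", "content"),
--     ("render_blocking_css", "performance"),
--     ("render_blocking_javascript", "performance"),
--     ("ssl_expired", "technical"),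
--     ("thin_content", "content"),
--     ("title_missing", "content"),
--     ("title_too_long", "content"),
--     ("very_thin_content", "content"),
-- ]
--
--
-- def _categorize_issue(issue_type: str) -> str:
--     """Categorize issue into broad categories (binary search in the sorted table)."""
--     lo, hi = 0, len(_TABLE)
--     while lo < hi:
--         mid = (lo + hi) // 2
--         if _TABLE[mid][0] < issue_type:
--             lo = mid + 1
--         else:
--             hi = mid
--     if lo < len(_TABLE) and _TABLE[lo][0] == issue_type:
--         return _TABLE[lo][1]
--     return "other"
-- ===== Notes on version B (the rewrite author's own statement) =====
-- stated objective: alternative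
-- what changed: Replaces the per-call linear scan over six category lists with a hand-written binary search over a single flat (issue_type, category) table sorted by issue_type (duplicates resolved to the first category in A's scan order), falling back to 'other' on a miss.
import Mathlib
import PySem

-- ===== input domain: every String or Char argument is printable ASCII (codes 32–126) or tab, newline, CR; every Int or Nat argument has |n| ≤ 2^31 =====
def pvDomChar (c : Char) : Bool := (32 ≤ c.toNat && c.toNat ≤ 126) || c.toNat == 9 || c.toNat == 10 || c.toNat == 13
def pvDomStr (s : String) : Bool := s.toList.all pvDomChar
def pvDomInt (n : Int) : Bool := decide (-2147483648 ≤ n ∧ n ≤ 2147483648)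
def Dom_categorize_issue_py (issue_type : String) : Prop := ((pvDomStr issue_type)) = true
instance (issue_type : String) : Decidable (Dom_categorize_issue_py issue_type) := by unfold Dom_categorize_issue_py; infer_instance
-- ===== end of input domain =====

-- B replaces A's per-call scan over six category lists by a binary search in one flat
-- sorted (issue_type, category) table; objective: alternative (different algorithm).
-- ===== PORT A =====
-- the literal `categories` dict of A, as an insertion-ordered association list
def pvCategories : List (String × List String) := [
  ("content", ["title_missing", "title_too_long", "meta_description_missing", "duplicate_title", "duplicate_meta_description", "thin_content", "very_thin_content", "duplicate_content", "near_duplicate_content", "potential_keyword_stuffing"]),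
  ("technical", ["no_https", "ssl_expired", "missing_canonical", "multiple_canonical_tags", "noindex_directive", "conflicting_robots_directives", "missing_viewport"]),
  ("links", ["broken_link", "orphan_page", "page_too_deep", "empty_anchor_text", "generic_anchor_text"]),
  ("performance", ["large_html_size", "no_compression", "render_blocking_css", "render_blocking_javascript", "images_without_dimensions"]),
  ("social", ["missing_og_tag", "missing_twitter_card", "missing_favicon"]),
  ("security", ["no_https", "ssl_expired", "missing_hsts", "missing_csp"])
]

-- the `for category, issue_types in categories.items(): if issue_type in issue_types: return category` loop, `return "other"` after
def pvScanLoop (issue_type : String) : List (String × List String) → String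
  | [] => "other"
  | (category, issue_types) :: rest =>
    if issue_types.contains issue_type then category else pvScanLoop issue_type rest

def categorize_issue_py (issue_type : String) : String :=
  pvScanLoop issue_type pvCategories

-- ===== PORT B =====
-- Source B's _TABLE literal: (issue_type, category), sorted by issue_type, first category wins
def pvTable : List (String × String) := [
  ("broken_link", "links"),
  ("conflicting_robots_directives", "technical"),
  ("duplicate_content", "content"),
  ("duplicate_meta_description", "content"),
  ("duplicate_title", "content"),
  ("empty_anchor_text", "links"),
  ("generic_anchor_text", "links"),
  ("images_without_dimensions", "performance"),
  ("large_html_size", "performance"),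
  ("meta_description_missing", "content"),
  ("missing_canonical", "technical"),
  ("missing_csp", "security"),
  ("missing_favicon", "social"),
  ("missing_hsts", "security"),
  ("missing_og_tag", "social"),
  ("missing_twitter_card", "social"),
  ("missing_viewport", "technical"),
  ("multiple_canonical_tags", "technical"),
  ("near_duplicate_content", "content"),
  ("no_compression", "performance"),
  ("no_https", "technical"),
  ("noindex_directive", "technical"),
  ("orphan_page", "links"),
  ("page_too_deep", "links"),
  ("potential_keyword_stuffing", "content"),
  ("render_blocking_css", "performance"),
  ("render_blocking_javascript", "performance"),
  ("ssl_expired", "technical"),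
  ("thin_content", "content"),
  ("title_missing", "content"),
  ("title_too_long", "content"),
  ("very_thin_content", "content")
]

-- Python's `<` on strings: code-point lexicographic comparison (exact on the ASCII domain)
def pvCharsLt : List Char → List Char → Bool
  | [], [] => false
  | [], _ :: _ => true
  | _ :: _, [] => false
  | a :: as, b :: bs =>
    if a.toNat < b.toNat then true
    else if b.toNat < a.toNat then false
    else pvCharsLt as bs

def pvStrLt (a b : String) : Bool := pvCharsLt a.toList b.toList

-- Source B's `while lo < hi` binary-search loop; `mid` stays in range by construction,
-- so `_TABLE[mid]` is `getD`
def pvBisect (s : String) (lo hi : Nat) : Nat :=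
  if lo < hi then
    let mid := (lo + hi) / 2
    if pvStrLt (pvTable.getD mid ("", "")).1 s then pvBisect s (mid + 1) hi
    else pvBisect s lo mid
  else lo
termination_by hi - lo
decreasing_by all_goals omega

-- the final `if lo < len(_TABLE) and _TABLE[lo][0] == issue_type: … return "other"`
def categorize_issue_py_alt (issue_type : String) : String :=
  let lo := pvBisect issue_type 0 pvTable.length
  if lo < pvTable.length ∧ (pvTable.getD lo ("", "")).1 = issue_type then
    (pvTable.getD lo ("", "")).2
  else "other"

-- ===== PRECONDITION & SPEC =====
def Spec_categorize_issue_py (issue_type : String) (out : String) : Prop := out = categorize_issue_py_alt issue_type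
instance (issue_type : String) (out : String) : Decidable (Spec_categorize_issue_py issue_type out) := by unfold Spec_categorize_issue_py; infer_instance

-- ===== CLAIM =====
def Claim_equal_categorize_issue_py : Prop := ∀ (issue_type : String), Dom_categorize_issue_py issue_type → Spec_categorize_issue_py issue_type (categorize_issue_py issue_type)

-- ===== LEMMAS AND PROOFS =====
-- the key at index i of the table
def pvKey (i : Nat) : String := (pvTable.getD i ("", "")).1

theorem pvCharsLt_irrefl : ∀ a : List Char, pvCharsLt a a = false := by
  intro a
  induction a with
  | nil => rfl
  | cons c cs ih => simp [pvCharsLt, ih]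

theorem pvCharsLt_trans : ∀ a b c : List Char,
    pvCharsLt a b = true → pvCharsLt b c = true → pvCharsLt a c = true := by
  intro a
  induction a with
  | nil =>
    intro b c hab hbc
    cases b with
    | nil => exact hbc
    | cons y ys => cases c with
      | nil => simp [pvCharsLt] at hbc
      | cons z zs => rfl
  | cons x xs ih =>
    intro b c hab hbc
    cases b with
    | nil => simp [pvCharsLt] at hab
    | cons y ys =>
      cases c with
      | nil => simp [pvCharsLt] at hbc
      | cons z zs =>
        simp only [pvCharsLt] at hab hbc ⊢
        split_ifs at hab hbc ⊢ <;>
          first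
            | rfl
            | omega
            | (exact ih ys zs hab hbc)

theorem pvStrLt_irrefl (a : String) : pvStrLt a a = false := pvCharsLt_irrefl a.toList

theorem pvStrLt_trans {a b c : String} (h1 : pvStrLt a b = true) (h2 : pvStrLt b c = true) :
    pvStrLt a c = true := pvCharsLt_trans a.toList b.toList c.toList h1 h2

-- the table's keys are strictly increasing (finite check)
theorem pvKey_mono : ∀ i < 32, ∀ j < 32, i < j → pvStrLt (pvKey i) (pvKey j) = true := by decide

-- scanning A's categories with any key of the table returns that key's category (finite check)
theorem pvScan_key : ∀ i < 32, pvScanLoop (pvKey i) pvCategories = (pvTable.getD i ("", "")).2 := by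
  decide

-- every issue type listed in A's categories is a key of B's table (finite check)
theorem pvCats_covered : ∀ p ∈ pvCategories, ∀ t ∈ p.2, ∃ i, i < 32 ∧ pvKey i = t := by decide

-- a string in no category list makes A's scan return "other"
theorem pvScan_notmem (s : String) :
    ∀ cs : List (String × List String), (∀ p ∈ cs, s ∉ p.2) → pvScanLoop s cs = "other" := by
  intro cs
  induction cs with
  | nil => intro _; rfl
  | cons p rest ih =>
    intro h
    obtain ⟨cat, types⟩ := p
    have hnot : s ∉ types := h (cat, types) (List.mem_cons_self ..)
    simp only [pvScanLoop]
    rw [if_neg (by simpa using hnot)]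
    exact ih fun q hq => h q (List.mem_cons_of_mem _ hq)

-- bisect-loop invariant: pvBisect returns the least index whose key is not below s
theorem pvBisect_spec (s : String) : ∀ n lo hi, hi - lo ≤ n → lo ≤ hi → hi ≤ 32 →
    (∀ j < lo, pvStrLt (pvKey j) s = true) →
    (∀ j, hi ≤ j → j < 32 → pvStrLt (pvKey j) s = false) →
    lo ≤ pvBisect s lo hi ∧ pvBisect s lo hi ≤ hi ∧
      (∀ j < pvBisect s lo hi, pvStrLt (pvKey j) s = true) ∧
      (∀ j, pvBisect s lo hi ≤ j → j < 32 → pvStrLt (pvKey j) s = false) := by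
  intro n
  induction n with
  | zero =>
    intro lo hi h0 hle hhi hlo hhi2
    have : lo = hi := by omega
    subst this
    rw [pvBisect, if_neg (by omega)]
    exact ⟨le_refl _, le_refl _, hlo, hhi2⟩
  | succ n ih =>
    intro lo hi hfuel hle hhi hlo hhi2
    rw [pvBisect]
    by_cases hlt : lo < hi
    · rw [if_pos hlt]
      simp only []
      set mid := (lo + hi) / 2 with hmid
      have hmb : lo ≤ mid ∧ mid < hi := by omega
      by_cases hc : pvStrLt (pvTable.getD mid ("", "")).1 s = true
      · rw [if_pos hc]
        have hlo' : ∀ j < mid + 1, pvStrLt (pvKey j) s = true := by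
          intro j hj
          rcases Nat.lt_or_ge j mid with h | h
          · exact pvStrLt_trans (pvKey_mono j (by omega) mid (by omega) h) hc
          · have : j = mid := by omega
            subst this; exact hc
        obtain ⟨h1, h2, h3, h4⟩ := ih (mid + 1) hi (by omega) (by omega) hhi hlo' hhi2
        exact ⟨by omega, h2, h3, h4⟩
      · rw [if_neg hc]
        have hc' : pvStrLt (pvKey mid) s = false := by
          simpa [pvKey] using (Bool.not_eq_true _).mp hc
        have hhi2' : ∀ j, mid ≤ j → j < 32 → pvStrLt (pvKey j) s = false := by
          intro j hj hj32
          rcases Nat.lt_or_ge j hi with h | h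
          · rcases Nat.eq_or_lt_of_le hj with h' | h'
            · exact h' ▸ hc'
            · cases hx : pvStrLt (pvKey j) s with
              | false => rfl
              | true =>
                have h2 := pvStrLt_trans (pvKey_mono mid (by omega) j hj32 h') hx
                rw [h2] at hc'
                exact hc'
          · exact hhi2 j h hj32
        obtain ⟨h1, h2, h3, h4⟩ := ih lo mid (by omega) (by omega) (by omega) hlo hhi2'
        exact ⟨h1, by omega, h3, h4⟩
    · rw [if_neg hlt]
      have : lo = hi := by omega
      subst this
      exact ⟨le_refl _, le_refl _, hlo, hhi2⟩

-- ===== VERDICT =====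
theorem categorize_issue_py_spec : Claim_equal_categorize_issue_py := by
  intro s _
  show categorize_issue_py s = categorize_issue_py_alt s
  have hlen : pvTable.length = 32 := by decide
  obtain ⟨-, hr32, hlt, hge⟩ :=
    pvBisect_spec s 32 0 32 (by omega) (by omega) (by omega) (by omega) (by omega)
  unfold categorize_issue_py categorize_issue_py_alt
  rw [hlen]
  set r := pvBisect s 0 32 with hr
  by_cases hc : r < 32 ∧ pvKey r = s
  · obtain ⟨hrn, hks⟩ := hc
    rw [if_pos ⟨hrn, hks⟩]
    rw [← hks]
    exact pvScan_key r hrn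
  · rw [if_neg (fun ⟨h1, h2⟩ => hc ⟨h1, h2⟩)]
    apply pvScan_notmem
    intro p hp hmem
    obtain ⟨i, hi, hkey⟩ := pvCats_covered p hp s hmem
    rcases lt_trichotomy i r with h | h | h
    · have h1 := hlt i h
      rw [hkey, pvStrLt_irrefl] at h1
      exact Bool.false_ne_true h1
    · exact hc ⟨h ▸ hi, h ▸ hkey⟩
    · have h1 : pvStrLt (pvKey r) s = false := hge r (le_refl r) (by omega)
      have h2 : pvStrLt (pvKey r) (pvKey i) = true := pvKey_mono r (by omega) i hi h
      rw [hkey] at h2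
      rw [h2] at h1
      exact Bool.true_eq_false.mp h1
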